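-- pv_equiv track=rewrite | github.com/adum/robotsrevenge | scripts/generate_custom_range_levels.py | format_reject_counts
-- ===== SOURCE A (Python) =====
-- REJECT_CODE_ORDER = (
--     "sr",
--     "md",
--     "pl",
--     "ux",
--     "mj",
--     "ct",
--     "ms",
--     "js",
--     "sb",
--     "se",
--     "ot",
--     "ne",
--     "rj",
--     "rs",
--     "tc",
--     "np",
--     "dn",
-- )
--
-- def format_reject_counts(reject_counts: dict[str, int]) -> str:
--     if not reject_counts:
--         return "-"
--     parts: list[str] = []
--     seen: set[str] = set()
--     for code in REJECT_CODE_ORDER: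
--         count = reject_counts.get(code, 0)
--         if count <= 0:
--             continue
--         parts.append(f"{code}={count}")
--         seen.add(code)
--     for code in sorted(reject_counts):
--         if code in seen:
--             continue
--         count = reject_counts[code]
--         if count <= 0:
--             continue
--         parts.append(f"{code}={count}")
--     return " ".join(parts) if parts else "-"
-- ===== SOURCE B (Python) =====
-- REJECT_CODE_ORDER = (
--     "sr", "md", "pl", "ux", "mj", "ct", "ms", "js", "sb",
--     "se", "ot", "ne", "rj", "rs", "tc", "np", "dn",
-- )
--
-- def format_reject_counts(reject_counts: dict[str, int]) -> str:
--     rank = {code: i for i, code in enumerate(REJECT_CODE_ORDER)}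
--     items = [(code, count) for code, count in reject_counts.items() if count > 0]
--     items.sort(key=lambda it: (rank.get(it[0], len(REJECT_CODE_ORDER)), it[0]))
--     return " ".join(f"{c}={v}" for c, v in items) if items else "-"
-- ===== Notes on version B (the rewrite author's own statement) =====
-- stated objective: simpler
-- what changed: A's two output passes (a scan of REJECT_CODE_ORDER maintaining a 'seen' set, then a scan of the sorted remaining keys) are replaced by a single sort of the positive items under the key (rank-in-order, code), with '-' falling out of the empty result.
import Mathlib
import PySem

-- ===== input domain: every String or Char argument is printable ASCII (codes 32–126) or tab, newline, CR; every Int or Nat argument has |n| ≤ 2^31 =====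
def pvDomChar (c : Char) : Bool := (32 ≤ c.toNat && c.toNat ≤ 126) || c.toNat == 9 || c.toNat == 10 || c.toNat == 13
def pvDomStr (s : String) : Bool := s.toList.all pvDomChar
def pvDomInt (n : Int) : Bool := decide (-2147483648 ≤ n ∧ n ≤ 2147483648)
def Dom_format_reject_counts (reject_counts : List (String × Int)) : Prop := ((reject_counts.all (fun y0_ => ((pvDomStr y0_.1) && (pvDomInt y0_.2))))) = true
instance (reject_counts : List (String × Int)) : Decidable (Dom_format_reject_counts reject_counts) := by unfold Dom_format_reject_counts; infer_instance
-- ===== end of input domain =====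

-- B replaces A's two output passes (ordered scan with a 'seen' set, then a sorted scan over the
-- remaining keys) by one sort of the positive items under the key (rank-in-order, code); simpler.

-- shared helpers: the module constant REJECT_CODE_ORDER and the f-string f"{code}={count}"
def pvOrder : List String :=
  ["sr","md","pl","ux","mj","ct","ms","js","sb","se","ot","ne","rj","rs","tc","np","dn"]
def pvFmt (p : String × Int) : String := PySem.Str.join "" [p.1, "=", PySem.Int.toStr p.2]

-- ===== PORT A =====
def format_reject_counts (reject_counts : List (String × Int)) : String :=
  if reject_counts = [] then "-" else
  let d := PySem.Dict.mk reject_counts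
  let st := pvOrder.foldl
    (fun (st : List String × PySem.Set String) code =>
      let count := d.getD code 0
      if count ≤ 0 then st
      else (st.1 ++ [pvFmt (code, count)], PySem.Set.add st.2 code))
    ([], PySem.Set.empty)
  let parts := (PySem.List.sorted d.keys (fun x => x)).foldl
    (fun parts code =>
      if PySem.Set.contains st.2 code then parts
      else
        let count := d.getD code 0
        if count ≤ 0 then parts
        else parts ++ [pvFmt (code, count)])
    st.1
  if parts = [] then "-" else PySem.Str.join " " parts

-- ===== PORT B =====
def format_reject_counts_alt (reject_counts : List (String × Int)) : String :=
  let rank := PySem.Dict.mk (pvOrder.zipIdx.map (fun p => (p.1, (p.2 : Int))))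
  let items := reject_counts.filter (fun p => decide (0 < p.2))
  let items := PySem.List.sorted2 items
    (fun it => rank.getD it.1 (pvOrder.length : Int)) (fun it => it.1)
  if items = [] then "-" else PySem.Str.join " " (items.map pvFmt)

-- ===== PRECONDITION & SPEC =====
-- Pre_ excludes association lists with duplicate keys: A's parameter is a Python dict, whose
-- item list never carries a duplicate key, so no input reachable from Python is excluded.
def Pre_format_reject_counts (reject_counts : List (String × Int)) : Prop :=
  (reject_counts.map Prod.fst).Nodup
instance (reject_counts : List (String × Int)) : Decidable (Pre_format_reject_counts reject_counts) := by unfold Pre_format_reject_counts; infer_instance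
def pvWitness_format_reject_counts : (List (String × Int)) := [("zz", 2), ("sr", 1), ("md", 0)]

def Spec_format_reject_counts (reject_counts : List (String × Int)) (out : String) : Prop := out = format_reject_counts_alt reject_counts
instance (reject_counts : List (String × Int)) (out : String) : Decidable (Spec_format_reject_counts reject_counts out) := by unfold Spec_format_reject_counts; infer_instance

-- ===== CLAIM (what is proved, stated in full; the proofs are below) =====
def Claim_equal_format_reject_counts : Prop := ∀ (reject_counts : List (String × Int)), Dom_format_reject_counts reject_counts → Pre_format_reject_counts reject_counts → Spec_format_reject_counts reject_counts (format_reject_counts reject_counts)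

-- ===== LEMMAS AND PROOFS =====

-- the codes A emits, in A's order: in-order positive codes, then the remaining positive keys sorted
def pvPosB (rc : List (String × Int)) (c : String) : Bool :=
  !decide ((PySem.Dict.mk rc).getD c 0 ≤ 0)
def pvCodesA (rc : List (String × Int)) : List String :=
  pvOrder.filter (pvPosB rc)
    ++ (PySem.List.sorted (rc.map Prod.fst) (fun x => x)).filter
        (fun c => !decide (c ∈ pvOrder) && pvPosB rc c)
-- B's sort key, first component: the rank of a code in pvOrder (17 when absent)
def pvRankD (c : String) : Int :=
  (PySem.Dict.mk (pvOrder.zipIdx.map (fun p => (p.1, (p.2 : Int))))).getD c (pvOrder.length : Int)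

theorem A_shape (rc : List (String × Int)) :
    format_reject_counts rc =
      if rc = [] then "-" else
      if pvCodesA rc = [] then "-" else
      PySem.Str.join " " ((pvCodesA rc).map (fun c => pvFmt (c, (PySem.Dict.mk rc).getD c 0))) := by
  unfold format_reject_counts
  by_cases h0 : rc = []
  · simp [h0]
  rw [if_neg h0, if_neg h0]
  dsimp only
  set d := PySem.Dict.mk rc with hd
  have hsplit : pvOrder.foldl
      (fun (st : List String × PySem.Set String) code =>
        let count := d.getD code 0
        if count ≤ 0 then st
        else (st.1 ++ [pvFmt (code, count)], PySem.Set.add st.2 code))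
      ([], PySem.Set.empty)
      = (pvOrder.foldl (fun acc code => if d.getD code 0 ≤ 0 then acc else acc ++ [pvFmt (code, d.getD code 0)]) [],
         pvOrder.foldl (fun s code => if d.getD code 0 ≤ 0 then s else PySem.Set.add s code) PySem.Set.empty) := by
    rw [← PySem.List.foldl_prod_mk
      (f := fun acc code => if d.getD code 0 ≤ 0 then acc else acc ++ [pvFmt (code, d.getD code 0)])
      (g := fun s code => if d.getD code 0 ≤ 0 then s else PySem.Set.add s code)]
    apply PySem.List.foldl_congr_mem
    intro acc x hx
    by_cases hc : d.getD x 0 ≤ 0 <;> simp [hc]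
  rw [hsplit]
  dsimp only
  have hparts1 : pvOrder.foldl (fun acc code => if d.getD code 0 ≤ 0 then acc else acc ++ [pvFmt (code, d.getD code 0)]) []
      = (pvOrder.filter (pvPosB rc)).map (fun c => pvFmt (c, d.getD c 0)) := by
    have := PySem.List.foldl_append_if (l := pvOrder) (p := pvPosB rc)
      (f := fun c => pvFmt (c, d.getD c 0)) (acc := ([] : List String))
    simp only [List.nil_append] at this
    rw [← this]
    apply PySem.List.foldl_congr_mem
    intro acc x hx
    by_cases hc : d.getD x 0 ≤ 0 <;> simp [hc, pvPosB, ← hd]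
  have hseen : pvOrder.foldl (fun s code => if d.getD code 0 ≤ 0 then s else PySem.Set.add s code) PySem.Set.empty
      = PySem.Set.ofList (pvOrder.filter (pvPosB rc)) := by
    rw [PySem.Set.ofList_eq_foldl, ← PySem.List.foldl_if_eq_foldl_filter]
    apply PySem.List.foldl_congr_mem
    intro acc x hx
    by_cases hc : d.getD x 0 ≤ 0 <;> simp [hc, pvPosB, ← hd]
  rw [hparts1, hseen]
  have hfold2 : (PySem.List.sorted d.keys (fun x => x)).foldl
      (fun parts code =>
        if PySem.Set.contains (PySem.Set.ofList (pvOrder.filter (pvPosB rc))) code then parts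
        else if d.getD code 0 ≤ 0 then parts else parts ++ [pvFmt (code, d.getD code 0)])
      ((pvOrder.filter (pvPosB rc)).map (fun c => pvFmt (c, d.getD c 0)))
      = (pvOrder.filter (pvPosB rc)).map (fun c => pvFmt (c, d.getD c 0))
        ++ ((PySem.List.sorted (rc.map Prod.fst) (fun x => x)).filter
              (fun c => !decide (c ∈ pvOrder) && pvPosB rc c)).map (fun c => pvFmt (c, d.getD c 0)) := by
    have hkeys : d.keys = rc.map Prod.fst := PySem.Dict.keys_mk rc
    rw [hkeys]
    have := PySem.List.foldl_append_if (l := PySem.List.sorted (rc.map Prod.fst) (fun x => x))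
      (p := fun c => !decide (c ∈ pvOrder) && pvPosB rc c)
      (f := fun c => pvFmt (c, d.getD c 0))
      (acc := (pvOrder.filter (pvPosB rc)).map (fun c => pvFmt (c, d.getD c 0)))
    rw [← this]
    apply PySem.List.foldl_congr_mem
    intro acc x hx
    rw [PySem.Set.contains_eq_decide]
    by_cases hin : x ∈ pvOrder <;> by_cases hc : d.getD x 0 ≤ 0 <;>
      simp [hin, hc, pvPosB, ← hd, PySem.Set.mem_ofList, List.mem_filter]
  rw [hfold2]
  rw [← List.map_append]
  simp only [pvCodesA, List.map_eq_nil_iff]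

theorem sorted2_eq_lex {α : Type} (xs : List α) (k1 : α → Int) (k2 : α → String) :
    PySem.List.sorted2 xs k1 k2 = PySem.List.sorted xs (fun x => toLex (k1 x, k2 x)) := by
  rw [PySem.List.sorted_eq_foldl_insertBy]
  unfold PySem.List.sorted2
  simp only [if_neg (by decide : ¬ (false = true))]
  congr 1
  funext acc a
  congr 1
  funext x b
  rcases lt_trichotomy (k1 x) (k1 b) with h | h | h
  · simp [Prod.Lex.toLex_lt_toLex, h, asymm h]
  · simp [Prod.Lex.toLex_lt_toLex, h]
  · have h1 : decide (k1 x < k1 b) = false := by simp [asymm h]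
    have h2 : decide (k1 b < k1 x) = true := by simp [h]
    have h3 : decide (k1 x = k1 b) = false := by simp; omega
    simp [Prod.Lex.toLex_lt_toLex, h1, h2, h3]

theorem lookup_mem {rc : List (String × Int)} (hn : (rc.map Prod.fst).Nodup)
    {c : String} {v : Int} : (c, v) ∈ rc ↔ (PySem.Dict.mk rc).get? c = some v := by
  induction rc with
  | nil => simp [PySem.Dict.get?]
  | cons hd tl ih =>
    obtain ⟨k, w⟩ := hd
    simp only [List.map_cons, List.nodup_cons] at hn
    rw [PySem.Dict.get?_mk_cons]
    by_cases hc : k = c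
    · subst hc
      simp only [BEq.rfl, if_true, List.mem_cons]
      constructor
      · rintro (h | hm)
        · cases h; rfl
        · exact absurd (List.mem_map_of_mem (f := Prod.fst) hm) (by simpa using hn.1)
      · intro h
        left
        simpa using (Option.some.inj h).symm
    · rw [if_neg (by simpa using hc)]
      rw [← ih hn.2]
      simp only [List.mem_cons]
      constructor
      · rintro (h | h)
        · cases h; exact absurd rfl hc
        · exact h
      · exact Or.inr

theorem getD_eq_of_mem {rc : List (String × Int)} (hn : (rc.map Prod.fst).Nodup)
    {c : String} {v : Int} (h : (c, v) ∈ rc) : (PySem.Dict.mk rc).getD c 0 = v := by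
  rw [PySem.Dict.getD, (lookup_mem hn).1 h]; rfl

theorem getD_pos_mem {rc : List (String × Int)} (hn : (rc.map Prod.fst).Nodup)
    {c : String} (h : 0 < (PySem.Dict.mk rc).getD c 0) :
    (c, (PySem.Dict.mk rc).getD c 0) ∈ rc := by
  rcases hq : (PySem.Dict.mk rc).get? c with _ | v
  · rw [PySem.Dict.getD, hq] at h; simp at h
  · rw [PySem.Dict.getD, hq]
    exact (lookup_mem hn).2 hq

theorem rankD_notin {c : String} (h : c ∉ pvOrder) : pvRankD c = (pvOrder.length : Int) := by
  rw [pvRankD, PySem.Dict.getD]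
  have : (PySem.Dict.mk (pvOrder.zipIdx.map (fun p => (p.1, (p.2 : Int))))).get? c = none := by
    rw [PySem.Dict.get?]
    rw [List.find?_eq_none.2]
    · rfl
    · intro x hx
      simp only [List.mem_map] at hx
      obtain ⟨p, hp, rfl⟩ := hx
      have hmem : p.1 ∈ pvOrder := List.fst_mem_of_mem_zipIdx hp
      simp only [beq_iff_eq]
      intro hc2
      exact h (hc2 ▸ hmem)
  rw [this]; rfl

theorem rankD_in_lt : ∀ c ∈ pvOrder, pvRankD c < (pvOrder.length : Int) := by decide

theorem rankD_pairwise : List.Pairwise (fun a b => pvRankD a < pvRankD b) pvOrder := by decide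

theorem pvOrder_nodup : pvOrder.Nodup := by decide

-- B's single sort produces exactly A's code sequence, paired with each code's count
theorem main_sorted (rc : List (String × Int)) (hn : (rc.map Prod.fst).Nodup) :
    PySem.List.sorted (rc.filter (fun p => decide (0 < p.2)))
      (fun it => toLex (pvRankD it.1, it.1))
    = (pvCodesA rc).map (fun c => (c, (PySem.Dict.mk rc).getD c 0)) := by
  set d := PySem.Dict.mk rc with hd
  apply PySem.List.sorted_eq_of_perm_of_pairwise_lt
  · -- permutation
    rw [List.perm_ext_iff_of_nodup]
    · rintro ⟨c, v⟩
      rw [List.mem_map, List.mem_filter]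
      constructor
      · rintro ⟨c', hc', he⟩
        obtain ⟨rfl, rfl⟩ : c' = c ∧ (d.getD c' 0) = v := by
          exact ⟨congrArg Prod.fst he, congrArg Prod.snd he⟩
        have hpos : 0 < d.getD c' 0 := by
          rw [pvCodesA, List.mem_append, List.mem_filter, List.mem_filter] at hc'
          rcases hc' with ⟨_, hp⟩ | ⟨_, hp⟩ <;>
            · simp only [pvPosB, Bool.and_eq_true, Bool.not_eq_true', decide_eq_false_iff_not, ← hd] at hp
              omega
        exact ⟨getD_pos_mem hn hpos, by simpa using hpos⟩
      · rintro ⟨hm, hv⟩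
        have hgv : d.getD c 0 = v := getD_eq_of_mem hn hm
        have hvpos : 0 < v := by simpa using hv
        refine ⟨c, ?_, by rw [hgv]⟩
        have hpos : pvPosB rc c = true := by
          simp only [pvPosB, Bool.not_eq_true', decide_eq_false_iff_not, ← hd]
          omega
        rw [pvCodesA, List.mem_append, List.mem_filter, List.mem_filter]
        by_cases ho : c ∈ pvOrder
        · exact Or.inl ⟨ho, hpos⟩
        · refine Or.inr ⟨?_, ?_⟩
          · rw [(PySem.List.sorted_perm _ _ _).mem_iff]
            exact List.mem_map_of_mem hm
          · simp [ho, hpos]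
    · -- the target list has no duplicates
      apply List.Nodup.map (fun a b hab => congrArg Prod.fst hab)
      rw [pvCodesA, List.nodup_append]
      refine ⟨pvOrder_nodup.filter _, ((PySem.List.sorted_perm _ _ _).nodup_iff.2 hn).filter _, ?_⟩
      intro a ha b hb rfl
      rw [List.mem_filter] at ha hb
      simp only [Bool.and_eq_true, Bool.not_eq_true', decide_eq_false_iff_not] at hb
      exact hb.2.1 ha.1
    · -- B's filtered items have no duplicates
      exact (List.Nodup.of_map Prod.fst hn).filter _
  · -- the target list is strictly increasing under B's sort key
    rw [List.pairwise_map]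
    rw [pvCodesA, List.pairwise_append]
    refine ⟨?_, ?_, ?_⟩
    · exact (rankD_pairwise.filter _).imp (fun h => Prod.Lex.toLex_lt_toLex.2 (Or.inl h))
    · have hle := PySem.List.sorted_pairwise (rc.map Prod.fst) (fun x => x)
      have hnd : List.Pairwise (fun a b => a ≠ b) (PySem.List.sorted (rc.map Prod.fst) (fun x => x)) :=
        (PySem.List.sorted_perm _ _ _).nodup_iff.2 hn
      have hlt : List.Pairwise (fun a b : String => a < b)
          (PySem.List.sorted (rc.map Prod.fst) (fun x => x)) :=
        (hle.and hnd).imp (fun ⟨h1, h2⟩ => lt_of_le_of_ne h1 h2)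
      refine (hlt.filter _).imp_of_mem ?_
      intro a b ha hb hab
      rw [List.mem_filter] at ha hb
      simp only [Bool.and_eq_true, Bool.not_eq_true', decide_eq_false_iff_not] at ha hb
      apply Prod.Lex.toLex_lt_toLex.2
      exact Or.inr ⟨by rw [rankD_notin ha.2.1, rankD_notin hb.2.1], hab⟩
    · intro a ha b hb
      rw [List.mem_filter] at ha hb
      simp only [Bool.and_eq_true, Bool.not_eq_true', decide_eq_false_iff_not] at hb
      apply Prod.Lex.toLex_lt_toLex.2
      exact Or.inl (by rw [rankD_notin hb.2.1]; exact rankD_in_lt a ha.1)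

-- ===== VERDICT (by name: the statement is the Claim_ definition above) =====
theorem format_reject_counts_spec : Claim_equal_format_reject_counts := by
  intro rc _ hpre
  unfold Spec_format_reject_counts
  rw [A_shape]
  unfold format_reject_counts_alt
  dsimp only
  rw [sorted2_eq_lex]
  rw [show (fun it : String × Int =>
        toLex ((PySem.Dict.mk (pvOrder.zipIdx.map (fun p => (p.1, (p.2 : Int))))).getD it.1 (pvOrder.length : Int), it.1))
      = (fun it : String × Int => toLex (pvRankD it.1, it.1)) from rfl]
  rw [main_sorted rc hpre]
  by_cases h0 : rc = []
  · subst h0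
    have : pvCodesA [] = [] := by decide
    simp [this]
  · rw [if_neg h0]
    rw [List.map_map]
    simp only [List.map_eq_nil_iff]
    rfl
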